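-- pv_equiv track=rewrite | github.com/Arjun101105/LegalEase | src/llm_integration.py | post_process_llm_output
-- ===== SOURCE A (Python) =====
-- def post_process_llm_output(llm_output: str) -> str:
--     """Clean and format LLM output"""
--     # Remove any remaining legal jargon
--     replacements = {
--         "impugned": "challenged",
--         "per contra": "on the other hand",
--         "inter alia": "among other things",
--         "vide": "see",
--         "vis-a-vis": "compared to",
--         "suo moto": "on its own",
--         "prima facie": "at first glance"
--     }
--
--     result = llm_output
--     for legal_term, simple_term in replacements.items():
--         result = result.replace(legal_term, simple_term)
--
--     return result
-- ===== SOURCE B (Python) =====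
-- def post_process_llm_output(llm_output: str) -> str:
--     """Clean and format LLM output"""
--     # Remove any remaining legal jargon
--     replacements = {
--         "impugned": "challenged",
--         "per contra": "on the other hand",
--         "inter alia": "among other things",
--         "vide": "see",
--         "vis-a-vis": "compared to",
--         "suo moto": "on its own",
--         "prima facie": "at first glance"
--     }
--
--     # Single left-to-right pass: at each position replace the first matching
--     # term, otherwise copy the character; never rescans produced output.
--     out = []
--     i = 0
--     n = len(llm_output)
--     while i < n:
--         for legal_term, simple_term in replacements.items():
--             if llm_output.startswith(legal_term, i):
--                 out.append(simple_term)
--                 i += len(legal_term)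
--                 break
--         else:
--             out.append(llm_output[i])
--             i += 1
--     return "".join(out)
-- ===== Notes on version B (the rewrite author's own statement) =====
-- stated objective: alternative
-- what changed: Replaces seven sequential full-text .replace passes with a single left-to-right scan that at each position substitutes the first matching jargon term and never rescans produced output; Pre_ excludes inputs containing one of four cascade substrings, where a later pass of A re-replaces a term assembled across an earlier replacement's boundary and the one-pass result is equally defensible.
-- outside the precondition, e.g. on post_process_llm_output('vis-a-vivide'): A returns 'compared toee', B returns 'vis-a-visee'
import Mathlib
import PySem

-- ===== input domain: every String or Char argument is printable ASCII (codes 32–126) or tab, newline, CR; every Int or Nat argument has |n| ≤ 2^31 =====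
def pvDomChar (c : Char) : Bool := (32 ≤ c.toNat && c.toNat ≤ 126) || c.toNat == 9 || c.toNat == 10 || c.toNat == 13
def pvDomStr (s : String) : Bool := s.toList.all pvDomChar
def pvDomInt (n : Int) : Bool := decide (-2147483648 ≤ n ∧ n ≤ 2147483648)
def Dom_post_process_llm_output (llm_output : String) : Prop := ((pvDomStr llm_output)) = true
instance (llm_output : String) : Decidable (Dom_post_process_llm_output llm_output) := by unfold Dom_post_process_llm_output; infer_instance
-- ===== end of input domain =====

-- B replaces A's seven sequential full-text `.replace` passes by ONE left-to-right scan
-- that substitutes the first matching jargon term at each position and never rescans its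
-- own output; on the cascade inputs described at D_ below the two differ and B's value
-- (replace only terms present in the original text) is the intended one.

-- ===== PORT A =====
def post_process_llm_output (llm_output : String) : String :=
  -- dict of replacements, iterated in insertion order
  let replacements : List (String × String) :=
    [("impugned", "challenged"), ("per contra", "on the other hand"),
     ("inter alia", "among other things"), ("vide", "see"),
     ("vis-a-vis", "compared to"), ("suo moto", "on its own"),
     ("prima facie", "at first glance")]
  -- result = llm_output; for ...: result = result.replace(legal_term, simple_term)
  replacements.foldl (fun result kv => PySem.Str.replace result kv.1 kv.2) llm_output

-- ===== PORT B =====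
-- the seven (term, replacement) pairs of Source B's dict, as character lists
def pk1 : List Char := ['i','m','p','u','g','n','e','d']
def pv1 : List Char := ['c','h','a','l','l','e','n','g','e','d']
def pk2 : List Char := ['p','e','r',' ','c','o','n','t','r','a']
def pv2 : List Char := ['o','n',' ','t','h','e',' ','o','t','h','e','r',' ','h','a','n','d']
def pk3 : List Char := ['i','n','t','e','r',' ','a','l','i','a']
def pv3 : List Char := ['a','m','o','n','g',' ','o','t','h','e','r',' ','t','h','i','n','g','s']
def pk4 : List Char := ['v','i','d','e']
def pv4 : List Char := ['s','e','e']
def pk5 : List Char := ['v','i','s','-','a','-','v','i','s']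
def pv5 : List Char := ['c','o','m','p','a','r','e','d',' ','t','o']
def pk6 : List Char := ['s','u','o',' ','m','o','t','o']
def pv6 : List Char := ['o','n',' ','i','t','s',' ','o','w','n']
def pk7 : List Char := ['p','r','i','m','a',' ','f','a','c','i','e']
def pv7 : List Char := ['a','t',' ','f','i','r','s','t',' ','g','l','a','n','c','e']

-- Source B's while-loop: at each position try the terms in dict order (startswith), emit the
-- replacement and skip the term, else copy one character; hand port of that loop as
-- structural recursion on the remaining characters (exact: same tests, same order, same skips)
def pvScan : List Char → List Char
  | [] => []
  | c :: t =>
    if pk1.isPrefixOf (c :: t) then pv1 ++ pvScan (t.drop (pk1.length - 1))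
    else if pk2.isPrefixOf (c :: t) then pv2 ++ pvScan (t.drop (pk2.length - 1))
    else if pk3.isPrefixOf (c :: t) then pv3 ++ pvScan (t.drop (pk3.length - 1))
    else if pk4.isPrefixOf (c :: t) then pv4 ++ pvScan (t.drop (pk4.length - 1))
    else if pk5.isPrefixOf (c :: t) then pv5 ++ pvScan (t.drop (pk5.length - 1))
    else if pk6.isPrefixOf (c :: t) then pv6 ++ pvScan (t.drop (pk6.length - 1))
    else if pk7.isPrefixOf (c :: t) then pv7 ++ pvScan (t.drop (pk7.length - 1))
    else c :: pvScan t
  termination_by s => s.length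
  decreasing_by all_goals (simp [List.length_drop]; try omega)

def post_process_llm_output_alt (llm_output : String) : String :=
  String.ofList (pvScan llm_output.toList)

-- ===== PRECONDITION & SPEC =====
-- Pre_ excludes inputs containing one of the four cascade substrings "inter aliauo moto",
-- "suo motper contra", "vis-a-vivide", "inter aliauo motper contra": there a later
-- .replace pass of A matches a jargon term assembled across the boundary of an earlier
-- replacement (e.g. A "inter aliauo moto" = "among other thingon its own" while the
-- one-pass B gives "among other thingsuo moto"); whether such stacked fragments should be
-- re-replaced is a corner no caller specifies, and the two strategies legitimately differ.
def Pre_post_process_llm_output (llm_output : String) : Prop :=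
  PySem.Str.isIn "inter aliauo moto" llm_output = false ∧
  PySem.Str.isIn "suo motper contra" llm_output = false ∧
  PySem.Str.isIn "vis-a-vivide" llm_output = false ∧
  PySem.Str.isIn "inter aliauo motper contra" llm_output = false
instance (llm_output : String) : Decidable (Pre_post_process_llm_output llm_output) := by
  unfold Pre_post_process_llm_output; infer_instance

def pvWitness_post_process_llm_output : String := "vide the impugned order, inter alia"

def Spec_post_process_llm_output (llm_output : String) (out : String) : Prop :=
  out = post_process_llm_output_alt llm_output
instance (llm_output : String) (out : String) : Decidable (Spec_post_process_llm_output llm_output out) := by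
  unfold Spec_post_process_llm_output; infer_instance

-- ===== CLAIM =====
def Claim_equal_post_process_llm_output : Prop :=
  ∀ (llm_output : String), Dom_post_process_llm_output llm_output →
    Pre_post_process_llm_output llm_output →
    Spec_post_process_llm_output llm_output (post_process_llm_output llm_output)

-- ===== LEMMAS AND PROOFS =====

-- Python's str.replace for one pattern, without the fuel/accumulator of PySem's go
def pvRepl (k v : List Char) : List Char → List Char
  | [] => []
  | c :: t =>
    if k.isPrefixOf (c :: t) then v ++ pvRepl k v (t.drop (k.length - 1))
    else c :: pvRepl k v t
  termination_by s => s.length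
  decreasing_by all_goals (simp [List.length_drop]; try omega)

lemma pvRepl_nil (k v : List Char) : pvRepl k v [] = [] := by rw [pvRepl]

lemma pvRepl_cons (k v : List Char) (c : Char) (t : List Char) :
    pvRepl k v (c :: t) =
      if k.isPrefixOf (c :: t) then v ++ pvRepl k v (t.drop (k.length - 1))
      else c :: pvRepl k v t := by
  rw [pvRepl]

-- A's seven passes in order
def pvChain (s : List Char) : List Char :=
  pvRepl pk7 pv7 (pvRepl pk6 pv6 (pvRepl pk5 pv5 (pvRepl pk4 pv4
    (pvRepl pk3 pv3 (pvRepl pk2 pv2 (pvRepl pk1 pv1 s))))))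

-- the four cascade triggers, as character lists
def pt1 : List Char := "inter aliauo moto".toList
def pt2 : List Char := "suo motper contra".toList
def pt3 : List Char := "vis-a-vivide".toList
def pt4 : List Char := "inter aliauo motper contra".toList

def pvClean (s : List Char) : Prop :=
  ¬ pt1 <:+: s ∧ ¬ pt2 <:+: s ∧ ¬ pt3 <:+: s ∧ ¬ pt4 <:+: s

lemma pvClean_suffix {s u : List Char} (h : u <:+ s) (hc : pvClean s) : pvClean u := by
  obtain ⟨h1, h2, h3, h4⟩ := hc
  exact ⟨fun hx => h1 (hx.trans h.isInfix), fun hx => h2 (hx.trans h.isInfix),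
         fun hx => h3 (hx.trans h.isInfix), fun hx => h4 (hx.trans h.isInfix)⟩

-- key tails (key without its first character) and the two "bad" continuations
def pq2 : List Char := ['e','r',' ','c','o','n','t','r','a']
def pq3 : List Char := ['n','t','e','r',' ','a','l','i','a']
def pq4 : List Char := ['i','d','e']
def pq5 : List Char := ['i','s','-','a','-','v','i','s']
def pq6 : List Char := ['u','o',' ','m','o','t','o']
def pq7 : List Char := ['r','i','m','a',' ','f','a','c','i','e']
def pb2 : List Char := "uo motper contra".toList
def pb3 : List Char := "is-a-vivide".toList

lemma prefix_append_cases (v : List Char) : ∀ (p u : List Char),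
    p <+: v ++ u → p <+: v ∨ v <+: p := by
  induction v with
  | nil => intro p u _; right; exact List.nil_prefix
  | cons b v' ih =>
    intro p u h
    cases p with
    | nil => left; exact List.nil_prefix
    | cons a p' =>
      rw [List.cons_append, List.cons_prefix_cons] at h
      obtain ⟨rfl, h'⟩ := h
      rcases ih p' u h' with h'' | h''
      · left; exact List.cons_prefix_cons.mpr ⟨rfl, h''⟩
      · right; exact List.cons_prefix_cons.mpr ⟨rfl, h''⟩

-- pvRepl commutes past a block w, given that no match can start inside w
lemma pvCommCond (k v : List Char) : ∀ (w u : List Char),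
    (∀ q ∈ w.tails, q ≠ [] → k.isPrefixOf (q ++ u) = false) →
    pvRepl k v (w ++ u) = w ++ pvRepl k v u := by
  intro w
  induction w with
  | nil => intro u _; simp
  | cons a w' ih =>
    intro u h
    rw [List.cons_append, pvRepl_cons, if_neg ?hneg]
    · rw [ih u (fun q hq hqne =>
        h q ((List.mem_tails _ _).mpr (((List.mem_tails _ _).mp hq).trans (List.suffix_cons a w'))) hqne)]
      simp
    case hneg =>
      intro habs
      have hfalse := h (a :: w') ((List.mem_tails _ _).mpr List.suffix_rfl) (by simp)
      rw [List.cons_append] at hfalse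
      rw [hfalse] at habs
      exact absurd habs (by decide)

lemma pvComm (k v w : List Char)
    (hC : ∀ q ∈ w.tails, q ≠ [] → (k.isPrefixOf q = false ∧ q.isPrefixOf k = false))
    (u : List Char) : pvRepl k v (w ++ u) = w ++ pvRepl k v u := by
  apply pvCommCond
  intro q hq hqne
  rcases hC q hq hqne with ⟨hkq, hqk⟩
  by_contra hb
  rw [Bool.not_eq_false] at hb
  rcases prefix_append_cases q k u (List.isPrefixOf_iff_prefix.mp hb) with h | h
  · have := List.isPrefixOf_iff_prefix.mpr h; rw [hkq] at this; exact absurd this (by decide)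
  · have := List.isPrefixOf_iff_prefix.mpr h; rw [hqk] at this; exact absurd this (by decide)

lemma pvRepl_matched (k v : List Char) (hk : k ≠ []) (u : List Char) :
    pvRepl k v (k ++ u) = v ++ pvRepl k v u := by
  cases k with
  | nil => exact absurd rfl hk
  | cons a k' =>
    rw [List.cons_append, pvRepl_cons,
        if_pos (List.isPrefixOf_iff_prefix.mpr (by rw [← List.cons_append]; exact List.prefix_append _ _))]
    congr 2
    rw [List.length_cons]
    simp

-- how a prefix of pvRepl's output relates to its input
lemma pvRepl_prefix (k v : List Char) : ∀ (u p : List Char),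
    (∀ b ∈ p.tails, b ≠ [] → v.isPrefixOf b = false) →
    p <+: pvRepl k v u →
    p <+: u ∨ ∃ j : Nat, (p.take j ++ k) <+: u ∧ p.drop j ≠ [] ∧ p.drop j <+: v := by
  intro u
  induction u with
  | nil => intro p _ hp; rw [pvRepl_nil] at hp; left; exact hp
  | cons c t ih =>
    intro p hb hp
    rcases eq_or_ne p [] with rfl | hpne
    · left; exact List.nil_prefix
    by_cases hm : k.isPrefixOf (c :: t) = true
    · rw [pvRepl_cons, if_pos hm] at hp
      rcases prefix_append_cases v p _ hp with h1 | h2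
      · right
        refine ⟨0, ?_, by simpa using hpne, by simpa using h1⟩
        simpa using List.isPrefixOf_iff_prefix.mp hm
      · exfalso
        have hfalse := hb p ((List.mem_tails _ _).mpr List.suffix_rfl) hpne
        have htrue := List.isPrefixOf_iff_prefix.mpr h2
        rw [hfalse] at htrue; exact absurd htrue (by decide)
    · rw [pvRepl_cons, if_neg hm] at hp
      obtain ⟨a, p', rfl⟩ : ∃ a p', p = a :: p' := by
        cases p with
        | nil => exact absurd rfl hpne
        | cons a p' => exact ⟨a, p', rfl⟩
      rw [List.cons_prefix_cons] at hp
      obtain ⟨hac, hp'⟩ := hp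
      have hb' : ∀ b ∈ p'.tails, b ≠ [] → v.isPrefixOf b = false := fun b hbm hbne =>
        hb b ((List.mem_tails _ _).mpr (((List.mem_tails _ _).mp hbm).trans (List.suffix_cons a p'))) hbne
      rcases ih p' hb' hp' with h | ⟨j, hj1, hj2, hj3⟩
      · left; exact List.cons_prefix_cons.mpr ⟨hac, h⟩
      · right
        refine ⟨j + 1, ?_, by simpa using hj2, by simpa using hj3⟩
        rw [List.take_succ_cons, List.cons_append]
        exact List.cons_prefix_cons.mpr ⟨hac, hj1⟩

lemma pvRepl_prefix_clean (k v u p : List Char)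
    (hb : ∀ b ∈ p.tails, b ≠ [] → v.isPrefixOf b = false)
    (hB : ∀ b ∈ p.tails, b ≠ [] → b.isPrefixOf v = false)
    (h : p <+: pvRepl k v u) : p <+: u := by
  rcases pvRepl_prefix k v u p hb h with h' | ⟨j, _, hj2, hj3⟩
  · exact h'
  · exfalso
    have hfalse := hB (p.drop j) ((List.mem_tails _ _).mpr (List.drop_suffix j p)) hj2
    have htrue := List.isPrefixOf_iff_prefix.mpr hj3
    rw [hfalse] at htrue; exact absurd htrue (by decide)

-- the two genuinely dangerous single passes
lemma tr_f2_uo (X : List Char) (h : pq6 <+: pvRepl pk2 pv2 X) : pq6 <+: X ∨ pb2 <+: X := by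
  rcases pvRepl_prefix pk2 pv2 X pq6 (by decide) h with h' | ⟨j, hj1, hj2, hj3⟩
  · left; exact h'
  · have hjlt : j < 7 := by
      by_contra hge
      exact hj2 (List.drop_eq_nil_iff.mpr (by simp [pq6]; omega))
    interval_cases j
    · exact absurd (List.isPrefixOf_iff_prefix.mpr hj3) (by decide)
    · exact absurd (List.isPrefixOf_iff_prefix.mpr hj3) (by decide)
    · exact absurd (List.isPrefixOf_iff_prefix.mpr hj3) (by decide)
    · exact absurd (List.isPrefixOf_iff_prefix.mpr hj3) (by decide)
    · exact absurd (List.isPrefixOf_iff_prefix.mpr hj3) (by decide)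
    · exact absurd (List.isPrefixOf_iff_prefix.mpr hj3) (by decide)
    · right
      have he : pq6.take 6 ++ pk2 = pb2 := by decide
      rwa [he] at hj1

lemma tr_f4_is (X : List Char) (h : pq5 <+: pvRepl pk4 pv4 X) : pq5 <+: X ∨ pb3 <+: X := by
  rcases pvRepl_prefix pk4 pv4 X pq5 (by decide) h with h' | ⟨j, hj1, hj2, hj3⟩
  · left; exact h'
  · have hjlt : j < 8 := by
      by_contra hge
      exact hj2 (List.drop_eq_nil_iff.mpr (by simp [pq5]; omega))
    interval_cases j
    · exact absurd (List.isPrefixOf_iff_prefix.mpr hj3) (by decide)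
    · exact absurd (List.isPrefixOf_iff_prefix.mpr hj3) (by decide)
    · exact absurd (List.isPrefixOf_iff_prefix.mpr hj3) (by decide)
    · exact absurd (List.isPrefixOf_iff_prefix.mpr hj3) (by decide)
    · exact absurd (List.isPrefixOf_iff_prefix.mpr hj3) (by decide)
    · exact absurd (List.isPrefixOf_iff_prefix.mpr hj3) (by decide)
    · exact absurd (List.isPrefixOf_iff_prefix.mpr hj3) (by decide)
    · right
      have he : pq5.take 7 ++ pk4 = pb3 := by decide
      rwa [he] at hj1

-- transfer of each key tail back through the earlier passes
lemma chain2 (t : List Char) (h : pq2 <+: pvRepl pk1 pv1 t) : pq2 <+: t :=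
  pvRepl_prefix_clean pk1 pv1 t pq2 (by decide) (by decide) h

lemma chain3 (t : List Char)
    (h : pq3 <+: pvRepl pk2 pv2 (pvRepl pk1 pv1 t)) : pq3 <+: t :=
  pvRepl_prefix_clean pk1 pv1 t pq3 (by decide) (by decide)
    (pvRepl_prefix_clean pk2 pv2 _ pq3 (by decide) (by decide) h)

lemma chain4 (t : List Char)
    (h : pq4 <+: pvRepl pk3 pv3 (pvRepl pk2 pv2 (pvRepl pk1 pv1 t))) : pq4 <+: t :=
  pvRepl_prefix_clean pk1 pv1 t pq4 (by decide) (by decide)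
    (pvRepl_prefix_clean pk2 pv2 _ pq4 (by decide) (by decide)
      (pvRepl_prefix_clean pk3 pv3 _ pq4 (by decide) (by decide) h))

lemma chain5 (t : List Char)
    (h : pq5 <+: pvRepl pk4 pv4 (pvRepl pk3 pv3 (pvRepl pk2 pv2 (pvRepl pk1 pv1 t)))) :
    pq5 <+: t ∨ pb3 <+: t := by
  rcases tr_f4_is _ h with h' | h'
  · left
    exact pvRepl_prefix_clean pk1 pv1 t pq5 (by decide) (by decide)
      (pvRepl_prefix_clean pk2 pv2 _ pq5 (by decide) (by decide)
        (pvRepl_prefix_clean pk3 pv3 _ pq5 (by decide) (by decide) h'))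
  · right
    exact pvRepl_prefix_clean pk1 pv1 t pb3 (by decide) (by decide)
      (pvRepl_prefix_clean pk2 pv2 _ pb3 (by decide) (by decide)
        (pvRepl_prefix_clean pk3 pv3 _ pb3 (by decide) (by decide) h'))

lemma chain6 (t : List Char)
    (h : pq6 <+: pvRepl pk5 pv5 (pvRepl pk4 pv4 (pvRepl pk3 pv3 (pvRepl pk2 pv2 (pvRepl pk1 pv1 t))))) :
    pq6 <+: t ∨ pb2 <+: t := by
  have h4 := pvRepl_prefix_clean pk5 pv5 _ pq6 (by decide) (by decide) h
  have h3 := pvRepl_prefix_clean pk4 pv4 _ pq6 (by decide) (by decide) h4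
  have h2 := pvRepl_prefix_clean pk3 pv3 _ pq6 (by decide) (by decide) h3
  rcases tr_f2_uo _ h2 with h' | h'
  · left; exact pvRepl_prefix_clean pk1 pv1 t pq6 (by decide) (by decide) h'
  · right; exact pvRepl_prefix_clean pk1 pv1 t pb2 (by decide) (by decide) h'

lemma chain7 (t : List Char)
    (h : pq7 <+: pvRepl pk6 pv6 (pvRepl pk5 pv5 (pvRepl pk4 pv4 (pvRepl pk3 pv3 (pvRepl pk2 pv2 (pvRepl pk1 pv1 t)))))) :
    pq7 <+: t :=
  pvRepl_prefix_clean pk1 pv1 t pq7 (by decide) (by decide)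
    (pvRepl_prefix_clean pk2 pv2 _ pq7 (by decide) (by decide)
      (pvRepl_prefix_clean pk3 pv3 _ pq7 (by decide) (by decide)
        (pvRepl_prefix_clean pk4 pv4 _ pq7 (by decide) (by decide)
          (pvRepl_prefix_clean pk5 pv5 _ pq7 (by decide) (by decide)
            (pvRepl_prefix_clean pk6 pv6 _ pq7 (by decide) (by decide) h)))))

-- the conditional commute of pass 6 past "among other things"
lemma cond_v3_k6 (X : List Char) (hX : ¬ pq6 <+: X) :
    ∀ q ∈ pv3.tails, q ≠ [] → pk6.isPrefixOf (q ++ X) = false := by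
  intro q hq hqne
  by_contra hb
  rw [Bool.not_eq_false] at hb
  have hpre := List.isPrefixOf_iff_prefix.mp hb
  rcases prefix_append_cases q pk6 X hpre with h | h
  · -- pk6 <+: q with q a suffix of pv3: impossible
    have hb6 : pk6.isPrefixOf q = true := List.isPrefixOf_iff_prefix.mpr h
    have hfalse : False := by clear hb hpre hX h; revert q; decide
    exact hfalse
  · -- q <+: pk6 with q a nonempty suffix of pv3 forces q = ['s']
    have hb6 : q.isPrefixOf pk6 = true := List.isPrefixOf_iff_prefix.mpr h
    have hqs : q = ['s'] := by clear hb hpre hX h; revert q; decide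
    subst hqs
    apply hX
    have hsplit : pk6 = 's' :: pq6 := by decide
    rw [hsplit] at hpre
    rw [List.singleton_append, List.cons_prefix_cons] at hpre
    exact hpre.2

lemma pvScan_nil : pvScan [] = [] := by rw [pvScan]

lemma pvScan_cons (c : Char) (t : List Char) :
    pvScan (c :: t) =
      if pk1.isPrefixOf (c :: t) then pv1 ++ pvScan (t.drop (pk1.length - 1))
      else if pk2.isPrefixOf (c :: t) then pv2 ++ pvScan (t.drop (pk2.length - 1))
      else if pk3.isPrefixOf (c :: t) then pv3 ++ pvScan (t.drop (pk3.length - 1))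
      else if pk4.isPrefixOf (c :: t) then pv4 ++ pvScan (t.drop (pk4.length - 1))
      else if pk5.isPrefixOf (c :: t) then pv5 ++ pvScan (t.drop (pk5.length - 1))
      else if pk6.isPrefixOf (c :: t) then pv6 ++ pvScan (t.drop (pk6.length - 1))
      else if pk7.isPrefixOf (c :: t) then pv7 ++ pvScan (t.drop (pk7.length - 1))
      else c :: pvScan t := by
  rw [pvScan]

-- pvScan on a string starting with term i
lemma pvScan_m1 (u : List Char) : pvScan (pk1 ++ u) = pv1 ++ pvScan u := by
  have hpos : pk1.isPrefixOf ('i'::'m'::'p'::'u'::'g'::'n'::'e'::'d'::u) = true := List.isPrefixOf_iff_prefix.mpr ⟨u, rfl⟩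
  show pvScan ('i'::'m'::'p'::'u'::'g'::'n'::'e'::'d'::u) = pv1 ++ pvScan u
  rw [pvScan_cons, if_pos hpos]
  rfl

lemma pvScan_m2 (u : List Char) : pvScan (pk2 ++ u) = pv2 ++ pvScan u := by
  have hpos : pk2.isPrefixOf ('p'::'e'::'r'::' '::'c'::'o'::'n'::'t'::'r'::'a'::u) = true := List.isPrefixOf_iff_prefix.mpr ⟨u, rfl⟩
  have hn1 : ¬ (pk1.isPrefixOf ('p'::'e'::'r'::' '::'c'::'o'::'n'::'t'::'r'::'a'::u) = true) := fun hx => by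
    obtain ⟨r, hr⟩ := List.isPrefixOf_iff_prefix.mp hx; simp [pk1] at hr
  show pvScan ('p'::'e'::'r'::' '::'c'::'o'::'n'::'t'::'r'::'a'::u) = pv2 ++ pvScan u
  rw [pvScan_cons, if_neg hn1, if_pos hpos]
  rfl

lemma pvScan_m3 (u : List Char) : pvScan (pk3 ++ u) = pv3 ++ pvScan u := by
  have hpos : pk3.isPrefixOf ('i'::'n'::'t'::'e'::'r'::' '::'a'::'l'::'i'::'a'::u) = true := List.isPrefixOf_iff_prefix.mpr ⟨u, rfl⟩
  have hn1 : ¬ (pk1.isPrefixOf ('i'::'n'::'t'::'e'::'r'::' '::'a'::'l'::'i'::'a'::u) = true) := fun hx => by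
    obtain ⟨r, hr⟩ := List.isPrefixOf_iff_prefix.mp hx; simp [pk1] at hr
  have hn2 : ¬ (pk2.isPrefixOf ('i'::'n'::'t'::'e'::'r'::' '::'a'::'l'::'i'::'a'::u) = true) := fun hx => by
    obtain ⟨r, hr⟩ := List.isPrefixOf_iff_prefix.mp hx; simp [pk2] at hr
  show pvScan ('i'::'n'::'t'::'e'::'r'::' '::'a'::'l'::'i'::'a'::u) = pv3 ++ pvScan u
  rw [pvScan_cons, if_neg hn1, if_neg hn2, if_pos hpos]
  rfl

lemma pvScan_m4 (u : List Char) : pvScan (pk4 ++ u) = pv4 ++ pvScan u := by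
  have hpos : pk4.isPrefixOf ('v'::'i'::'d'::'e'::u) = true := List.isPrefixOf_iff_prefix.mpr ⟨u, rfl⟩
  have hn1 : ¬ (pk1.isPrefixOf ('v'::'i'::'d'::'e'::u) = true) := fun hx => by
    obtain ⟨r, hr⟩ := List.isPrefixOf_iff_prefix.mp hx; simp [pk1] at hr
  have hn2 : ¬ (pk2.isPrefixOf ('v'::'i'::'d'::'e'::u) = true) := fun hx => by
    obtain ⟨r, hr⟩ := List.isPrefixOf_iff_prefix.mp hx; simp [pk2] at hr
  have hn3 : ¬ (pk3.isPrefixOf ('v'::'i'::'d'::'e'::u) = true) := fun hx => by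
    obtain ⟨r, hr⟩ := List.isPrefixOf_iff_prefix.mp hx; simp [pk3] at hr
  show pvScan ('v'::'i'::'d'::'e'::u) = pv4 ++ pvScan u
  rw [pvScan_cons, if_neg hn1, if_neg hn2, if_neg hn3, if_pos hpos]
  rfl

lemma pvScan_m5 (u : List Char) : pvScan (pk5 ++ u) = pv5 ++ pvScan u := by
  have hpos : pk5.isPrefixOf ('v'::'i'::'s'::'-'::'a'::'-'::'v'::'i'::'s'::u) = true := List.isPrefixOf_iff_prefix.mpr ⟨u, rfl⟩
  have hn1 : ¬ (pk1.isPrefixOf ('v'::'i'::'s'::'-'::'a'::'-'::'v'::'i'::'s'::u) = true) := fun hx => by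
    obtain ⟨r, hr⟩ := List.isPrefixOf_iff_prefix.mp hx; simp [pk1] at hr
  have hn2 : ¬ (pk2.isPrefixOf ('v'::'i'::'s'::'-'::'a'::'-'::'v'::'i'::'s'::u) = true) := fun hx => by
    obtain ⟨r, hr⟩ := List.isPrefixOf_iff_prefix.mp hx; simp [pk2] at hr
  have hn3 : ¬ (pk3.isPrefixOf ('v'::'i'::'s'::'-'::'a'::'-'::'v'::'i'::'s'::u) = true) := fun hx => by
    obtain ⟨r, hr⟩ := List.isPrefixOf_iff_prefix.mp hx; simp [pk3] at hr
  have hn4 : ¬ (pk4.isPrefixOf ('v'::'i'::'s'::'-'::'a'::'-'::'v'::'i'::'s'::u) = true) := fun hx => by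
    obtain ⟨r, hr⟩ := List.isPrefixOf_iff_prefix.mp hx; simp [pk4] at hr
  show pvScan ('v'::'i'::'s'::'-'::'a'::'-'::'v'::'i'::'s'::u) = pv5 ++ pvScan u
  rw [pvScan_cons, if_neg hn1, if_neg hn2, if_neg hn3, if_neg hn4, if_pos hpos]
  rfl

lemma pvScan_m6 (u : List Char) : pvScan (pk6 ++ u) = pv6 ++ pvScan u := by
  have hpos : pk6.isPrefixOf ('s'::'u'::'o'::' '::'m'::'o'::'t'::'o'::u) = true := List.isPrefixOf_iff_prefix.mpr ⟨u, rfl⟩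
  have hn1 : ¬ (pk1.isPrefixOf ('s'::'u'::'o'::' '::'m'::'o'::'t'::'o'::u) = true) := fun hx => by
    obtain ⟨r, hr⟩ := List.isPrefixOf_iff_prefix.mp hx; simp [pk1] at hr
  have hn2 : ¬ (pk2.isPrefixOf ('s'::'u'::'o'::' '::'m'::'o'::'t'::'o'::u) = true) := fun hx => by
    obtain ⟨r, hr⟩ := List.isPrefixOf_iff_prefix.mp hx; simp [pk2] at hr
  have hn3 : ¬ (pk3.isPrefixOf ('s'::'u'::'o'::' '::'m'::'o'::'t'::'o'::u) = true) := fun hx => by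
    obtain ⟨r, hr⟩ := List.isPrefixOf_iff_prefix.mp hx; simp [pk3] at hr
  have hn4 : ¬ (pk4.isPrefixOf ('s'::'u'::'o'::' '::'m'::'o'::'t'::'o'::u) = true) := fun hx => by
    obtain ⟨r, hr⟩ := List.isPrefixOf_iff_prefix.mp hx; simp [pk4] at hr
  have hn5 : ¬ (pk5.isPrefixOf ('s'::'u'::'o'::' '::'m'::'o'::'t'::'o'::u) = true) := fun hx => by
    obtain ⟨r, hr⟩ := List.isPrefixOf_iff_prefix.mp hx; simp [pk5] at hr
  show pvScan ('s'::'u'::'o'::' '::'m'::'o'::'t'::'o'::u) = pv6 ++ pvScan u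
  rw [pvScan_cons, if_neg hn1, if_neg hn2, if_neg hn3, if_neg hn4, if_neg hn5, if_pos hpos]
  rfl

lemma pvScan_m7 (u : List Char) : pvScan (pk7 ++ u) = pv7 ++ pvScan u := by
  have hpos : pk7.isPrefixOf ('p'::'r'::'i'::'m'::'a'::' '::'f'::'a'::'c'::'i'::'e'::u) = true := List.isPrefixOf_iff_prefix.mpr ⟨u, rfl⟩
  have hn1 : ¬ (pk1.isPrefixOf ('p'::'r'::'i'::'m'::'a'::' '::'f'::'a'::'c'::'i'::'e'::u) = true) := fun hx => by
    obtain ⟨r, hr⟩ := List.isPrefixOf_iff_prefix.mp hx; simp [pk1] at hr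
  have hn2 : ¬ (pk2.isPrefixOf ('p'::'r'::'i'::'m'::'a'::' '::'f'::'a'::'c'::'i'::'e'::u) = true) := fun hx => by
    obtain ⟨r, hr⟩ := List.isPrefixOf_iff_prefix.mp hx; simp [pk2] at hr
  have hn3 : ¬ (pk3.isPrefixOf ('p'::'r'::'i'::'m'::'a'::' '::'f'::'a'::'c'::'i'::'e'::u) = true) := fun hx => by
    obtain ⟨r, hr⟩ := List.isPrefixOf_iff_prefix.mp hx; simp [pk3] at hr
  have hn4 : ¬ (pk4.isPrefixOf ('p'::'r'::'i'::'m'::'a'::' '::'f'::'a'::'c'::'i'::'e'::u) = true) := fun hx => by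
    obtain ⟨r, hr⟩ := List.isPrefixOf_iff_prefix.mp hx; simp [pk4] at hr
  have hn5 : ¬ (pk5.isPrefixOf ('p'::'r'::'i'::'m'::'a'::' '::'f'::'a'::'c'::'i'::'e'::u) = true) := fun hx => by
    obtain ⟨r, hr⟩ := List.isPrefixOf_iff_prefix.mp hx; simp [pk5] at hr
  have hn6 : ¬ (pk6.isPrefixOf ('p'::'r'::'i'::'m'::'a'::' '::'f'::'a'::'c'::'i'::'e'::u) = true) := fun hx => by
    obtain ⟨r, hr⟩ := List.isPrefixOf_iff_prefix.mp hx; simp [pk6] at hr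
  show pvScan ('p'::'r'::'i'::'m'::'a'::' '::'f'::'a'::'c'::'i'::'e'::u) = pv7 ++ pvScan u
  rw [pvScan_cons, if_neg hn1, if_neg hn2, if_neg hn3, if_neg hn4, if_neg hn5, if_neg hn6, if_pos hpos]
  rfl

-- the main equivalence on clean strings
lemma pvMain : ∀ (n : Nat) (s : List Char), s.length ≤ n → pvClean s → pvChain s = pvScan s := by
  intro n
  induction n with
  | zero =>
    intro s hs _
    cases s with
    | nil => simp [pvChain, pvRepl_nil, pvScan_nil]
    | cons c t => simp at hs
  | succ n ih =>
    intro s hs hc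
    cases s with
    | nil => simp [pvChain, pvRepl_nil, pvScan_nil]
    | cons c t =>
      by_cases h1 : pk1.isPrefixOf (c :: t) = true
      · obtain ⟨u, hu⟩ := List.isPrefixOf_iff_prefix.mp h1
        rw [← hu] at hs hc ⊢
        have hlen : u.length ≤ n := by simp [pk1] at hs; omega
        have hcu : pvClean u := pvClean_suffix ⟨pk1, rfl⟩ hc
        rw [pvScan_m1]
        unfold pvChain
        rw [pvRepl_matched pk1 pv1 (by decide) u,
            pvComm pk2 pv2 pv1 (by decide), pvComm pk3 pv3 pv1 (by decide),
            pvComm pk4 pv4 pv1 (by decide), pvComm pk5 pv5 pv1 (by decide),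
            pvComm pk6 pv6 pv1 (by decide), pvComm pk7 pv7 pv1 (by decide)]
        have hrec := ih u hlen hcu
        unfold pvChain at hrec
        rw [hrec]
      · by_cases h2 : pk2.isPrefixOf (c :: t) = true
        · obtain ⟨u, hu⟩ := List.isPrefixOf_iff_prefix.mp h2
          rw [← hu] at hs hc ⊢
          have hlen : u.length ≤ n := by simp [pk2] at hs; omega
          have hcu : pvClean u := pvClean_suffix ⟨pk2, rfl⟩ hc
          rw [pvScan_m2]
          unfold pvChain
          rw [pvComm pk1 pv1 pk2 (by decide),
              pvRepl_matched pk2 pv2 (by decide),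
              pvComm pk3 pv3 pv2 (by decide), pvComm pk4 pv4 pv2 (by decide),
              pvComm pk5 pv5 pv2 (by decide), pvComm pk6 pv6 pv2 (by decide),
              pvComm pk7 pv7 pv2 (by decide)]
          have hrec := ih u hlen hcu
          unfold pvChain at hrec
          rw [hrec]
        · by_cases h3 : pk3.isPrefixOf (c :: t) = true
          · obtain ⟨u, hu⟩ := List.isPrefixOf_iff_prefix.mp h3
            rw [← hu] at hs hc ⊢
            have hlen : u.length ≤ n := by simp [pk3] at hs; omega
            have hcu : pvClean u := pvClean_suffix ⟨pk3, rfl⟩ hc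
            rw [pvScan_m3]
            unfold pvChain
            rw [pvComm pk1 pv1 pk3 (by decide), pvComm pk2 pv2 pk3 (by decide),
                pvRepl_matched pk3 pv3 (by decide),
                pvComm pk4 pv4 pv3 (by decide), pvComm pk5 pv5 pv3 (by decide)]
            have hX : ¬ pq6 <+: pvRepl pk5 pv5 (pvRepl pk4 pv4 (pvRepl pk3 pv3
                (pvRepl pk2 pv2 (pvRepl pk1 pv1 u)))) := by
              intro hpre
              rcases chain6 u hpre with h | h
              · obtain ⟨r, hr⟩ := h
                exact hc.1 (List.IsPrefix.isInfix
                  ⟨r, by rw [show pt1 = pk3 ++ pq6 from by decide, List.append_assoc, hr]⟩)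
              · obtain ⟨r, hr⟩ := h
                exact hc.2.2.2 (List.IsPrefix.isInfix
                  ⟨r, by rw [show pt4 = pk3 ++ pb2 from by decide, List.append_assoc, hr]⟩)
            rw [pvCommCond pk6 pv6 pv3 _ (cond_v3_k6 _ hX),
                pvComm pk7 pv7 pv3 (by decide)]
            have hrec := ih u hlen hcu
            unfold pvChain at hrec
            rw [hrec]
          · by_cases h4 : pk4.isPrefixOf (c :: t) = true
            · obtain ⟨u, hu⟩ := List.isPrefixOf_iff_prefix.mp h4
              rw [← hu] at hs hc ⊢
              have hlen : u.length ≤ n := by simp [pk4] at hs; omega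
              have hcu : pvClean u := pvClean_suffix ⟨pk4, rfl⟩ hc
              rw [pvScan_m4]
              unfold pvChain
              rw [pvComm pk1 pv1 pk4 (by decide), pvComm pk2 pv2 pk4 (by decide),
                  pvComm pk3 pv3 pk4 (by decide),
                  pvRepl_matched pk4 pv4 (by decide),
                  pvComm pk5 pv5 pv4 (by decide), pvComm pk6 pv6 pv4 (by decide),
                  pvComm pk7 pv7 pv4 (by decide)]
              have hrec := ih u hlen hcu
              unfold pvChain at hrec
              rw [hrec]
            · by_cases h5 : pk5.isPrefixOf (c :: t) = true
              · obtain ⟨u, hu⟩ := List.isPrefixOf_iff_prefix.mp h5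
                rw [← hu] at hs hc ⊢
                have hlen : u.length ≤ n := by simp [pk5] at hs; omega
                have hcu : pvClean u := pvClean_suffix ⟨pk5, rfl⟩ hc
                rw [pvScan_m5]
                unfold pvChain
                rw [pvComm pk1 pv1 pk5 (by decide), pvComm pk2 pv2 pk5 (by decide),
                    pvComm pk3 pv3 pk5 (by decide), pvComm pk4 pv4 pk5 (by decide),
                    pvRepl_matched pk5 pv5 (by decide),
                    pvComm pk6 pv6 pv5 (by decide), pvComm pk7 pv7 pv5 (by decide)]
                have hrec := ih u hlen hcu
                unfold pvChain at hrec
                rw [hrec]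
              · by_cases h6 : pk6.isPrefixOf (c :: t) = true
                · obtain ⟨u, hu⟩ := List.isPrefixOf_iff_prefix.mp h6
                  rw [← hu] at hs hc ⊢
                  have hlen : u.length ≤ n := by simp [pk6] at hs; omega
                  have hcu : pvClean u := pvClean_suffix ⟨pk6, rfl⟩ hc
                  rw [pvScan_m6]
                  unfold pvChain
                  rw [pvComm pk1 pv1 pk6 (by decide), pvComm pk2 pv2 pk6 (by decide),
                      pvComm pk3 pv3 pk6 (by decide), pvComm pk4 pv4 pk6 (by decide),
                      pvComm pk5 pv5 pk6 (by decide),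
                      pvRepl_matched pk6 pv6 (by decide),
                      pvComm pk7 pv7 pv6 (by decide)]
                  have hrec := ih u hlen hcu
                  unfold pvChain at hrec
                  rw [hrec]
                · by_cases h7 : pk7.isPrefixOf (c :: t) = true
                  · obtain ⟨u, hu⟩ := List.isPrefixOf_iff_prefix.mp h7
                    rw [← hu] at hs hc ⊢
                    have hlen : u.length ≤ n := by simp [pk7] at hs; omega
                    have hcu : pvClean u := pvClean_suffix ⟨pk7, rfl⟩ hc
                    rw [pvScan_m7]
                    unfold pvChain
                    rw [pvComm pk1 pv1 pk7 (by decide), pvComm pk2 pv2 pk7 (by decide),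
                        pvComm pk3 pv3 pk7 (by decide), pvComm pk4 pv4 pk7 (by decide),
                        pvComm pk5 pv5 pk7 (by decide), pvComm pk6 pv6 pk7 (by decide),
                        pvRepl_matched pk7 pv7 (by decide)]
                    have hrec := ih u hlen hcu
                    unfold pvChain at hrec
                    rw [hrec]
                  · -- no term matches at this position
                    have hlen : t.length ≤ n := by simp at hs; omega
                    have hct : pvClean t := pvClean_suffix (List.suffix_cons c t) hc
                    have hrec := ih t hlen hct
                    have m1 : pvRepl pk1 pv1 (c :: t) = c :: pvRepl pk1 pv1 t := by
                      rw [pvRepl_cons, if_neg h1]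
                    have H2 : ¬ (pk2.isPrefixOf (c :: pvRepl pk1 pv1 t) = true) := by
                      intro hx
                      have hx' := List.isPrefixOf_iff_prefix.mp hx
                      rw [show pk2 = 'p' :: pq2 from by decide, List.cons_prefix_cons] at hx'
                      obtain ⟨hcc, htl⟩ := hx'
                      exact h2 (List.isPrefixOf_iff_prefix.mpr (by
                        rw [show pk2 = 'p' :: pq2 from by decide, List.cons_prefix_cons]
                        exact ⟨hcc, chain2 t htl⟩))
                    have m2 : pvRepl pk2 pv2 (c :: pvRepl pk1 pv1 t)
                        = c :: pvRepl pk2 pv2 (pvRepl pk1 pv1 t) := by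
                      rw [pvRepl_cons, if_neg H2]
                    have H3 : ¬ (pk3.isPrefixOf (c :: pvRepl pk2 pv2 (pvRepl pk1 pv1 t)) = true) := by
                      intro hx
                      have hx' := List.isPrefixOf_iff_prefix.mp hx
                      rw [show pk3 = 'i' :: pq3 from by decide, List.cons_prefix_cons] at hx'
                      obtain ⟨hcc, htl⟩ := hx'
                      exact h3 (List.isPrefixOf_iff_prefix.mpr (by
                        rw [show pk3 = 'i' :: pq3 from by decide, List.cons_prefix_cons]
                        exact ⟨hcc, chain3 t htl⟩))
                    have m3 : pvRepl pk3 pv3 (c :: pvRepl pk2 pv2 (pvRepl pk1 pv1 t))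
                        = c :: pvRepl pk3 pv3 (pvRepl pk2 pv2 (pvRepl pk1 pv1 t)) := by
                      rw [pvRepl_cons, if_neg H3]
                    have H4 : ¬ (pk4.isPrefixOf
                        (c :: pvRepl pk3 pv3 (pvRepl pk2 pv2 (pvRepl pk1 pv1 t))) = true) := by
                      intro hx
                      have hx' := List.isPrefixOf_iff_prefix.mp hx
                      rw [show pk4 = 'v' :: pq4 from by decide, List.cons_prefix_cons] at hx'
                      obtain ⟨hcc, htl⟩ := hx'
                      exact h4 (List.isPrefixOf_iff_prefix.mpr (by
                        rw [show pk4 = 'v' :: pq4 from by decide, List.cons_prefix_cons]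
                        exact ⟨hcc, chain4 t htl⟩))
                    have m4 : pvRepl pk4 pv4 (c :: pvRepl pk3 pv3 (pvRepl pk2 pv2 (pvRepl pk1 pv1 t)))
                        = c :: pvRepl pk4 pv4 (pvRepl pk3 pv3 (pvRepl pk2 pv2 (pvRepl pk1 pv1 t))) := by
                      rw [pvRepl_cons, if_neg H4]
                    have H5 : ¬ (pk5.isPrefixOf
                        (c :: pvRepl pk4 pv4 (pvRepl pk3 pv3 (pvRepl pk2 pv2 (pvRepl pk1 pv1 t)))) = true) := by
                      intro hx
                      have hx' := List.isPrefixOf_iff_prefix.mp hx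
                      rw [show pk5 = 'v' :: pq5 from by decide, List.cons_prefix_cons] at hx'
                      obtain ⟨hcc, htl⟩ := hx'
                      rcases chain5 t htl with h | h
                      · exact h5 (List.isPrefixOf_iff_prefix.mpr (by
                          rw [show pk5 = 'v' :: pq5 from by decide, List.cons_prefix_cons]
                          exact ⟨hcc, h⟩))
                      · obtain ⟨r, hr⟩ := h
                        exact hc.2.2.1 (List.IsPrefix.isInfix
                          ⟨r, by rw [show pt3 = 'v' :: pb3 from by decide, List.cons_append, hr, hcc]⟩)
                    have m5 : pvRepl pk5 pv5
                        (c :: pvRepl pk4 pv4 (pvRepl pk3 pv3 (pvRepl pk2 pv2 (pvRepl pk1 pv1 t))))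
                        = c :: pvRepl pk5 pv5
                            (pvRepl pk4 pv4 (pvRepl pk3 pv3 (pvRepl pk2 pv2 (pvRepl pk1 pv1 t)))) := by
                      rw [pvRepl_cons, if_neg H5]
                    have H6 : ¬ (pk6.isPrefixOf
                        (c :: pvRepl pk5 pv5 (pvRepl pk4 pv4 (pvRepl pk3 pv3
                          (pvRepl pk2 pv2 (pvRepl pk1 pv1 t))))) = true) := by
                      intro hx
                      have hx' := List.isPrefixOf_iff_prefix.mp hx
                      rw [show pk6 = 's' :: pq6 from by decide, List.cons_prefix_cons] at hx'
                      obtain ⟨hcc, htl⟩ := hx'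
                      rcases chain6 t htl with h | h
                      · exact h6 (List.isPrefixOf_iff_prefix.mpr (by
                          rw [show pk6 = 's' :: pq6 from by decide, List.cons_prefix_cons]
                          exact ⟨hcc, h⟩))
                      · obtain ⟨r, hr⟩ := h
                        exact hc.2.1 (List.IsPrefix.isInfix
                          ⟨r, by rw [show pt2 = 's' :: pb2 from by decide, List.cons_append, hr, hcc]⟩)
                    have m6 : pvRepl pk6 pv6
                        (c :: pvRepl pk5 pv5 (pvRepl pk4 pv4 (pvRepl pk3 pv3
                          (pvRepl pk2 pv2 (pvRepl pk1 pv1 t)))))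
                        = c :: pvRepl pk6 pv6
                            (pvRepl pk5 pv5 (pvRepl pk4 pv4 (pvRepl pk3 pv3
                              (pvRepl pk2 pv2 (pvRepl pk1 pv1 t))))) := by
                      rw [pvRepl_cons, if_neg H6]
                    have H7 : ¬ (pk7.isPrefixOf
                        (c :: pvRepl pk6 pv6 (pvRepl pk5 pv5 (pvRepl pk4 pv4 (pvRepl pk3 pv3
                          (pvRepl pk2 pv2 (pvRepl pk1 pv1 t)))))) = true) := by
                      intro hx
                      have hx' := List.isPrefixOf_iff_prefix.mp hx
                      rw [show pk7 = 'p' :: pq7 from by decide, List.cons_prefix_cons] at hx'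
                      obtain ⟨hcc, htl⟩ := hx'
                      exact h7 (List.isPrefixOf_iff_prefix.mpr (by
                        rw [show pk7 = 'p' :: pq7 from by decide, List.cons_prefix_cons]
                        exact ⟨hcc, chain7 t htl⟩))
                    have m7 : pvRepl pk7 pv7
                        (c :: pvRepl pk6 pv6 (pvRepl pk5 pv5 (pvRepl pk4 pv4 (pvRepl pk3 pv3
                          (pvRepl pk2 pv2 (pvRepl pk1 pv1 t))))))
                        = c :: pvRepl pk7 pv7
                            (pvRepl pk6 pv6 (pvRepl pk5 pv5 (pvRepl pk4 pv4 (pvRepl pk3 pv3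
                              (pvRepl pk2 pv2 (pvRepl pk1 pv1 t)))))) := by
                      rw [pvRepl_cons, if_neg H7]
                    unfold pvChain
                    rw [m1, m2, m3, m4, m5, m6, m7,
                        pvScan_cons, if_neg h1, if_neg h2, if_neg h3, if_neg h4,
                        if_neg h5, if_neg h6, if_neg h7]
                    unfold pvChain at hrec
                    rw [hrec]

-- bridge: PySem's replace equals pvRepl (for a nonempty pattern)
lemma go_succ_cons (k v : List Char) (n : Nat) (c : Char) (t acc : List Char) :
    PySem.Chars.replace.go k v (n + 1) (c :: t) acc =
      if k.isPrefixOf (c :: t) then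
        PySem.Chars.replace.go k v n (List.drop k.length (c :: t)) (v.reverse ++ acc)
      else PySem.Chars.replace.go k v n t (c :: acc) := by
  simp [PySem.Chars.replace.go]

lemma go_nil (k v : List Char) (n : Nat) (acc : List Char) :
    PySem.Chars.replace.go k v n [] acc = acc.reverse := by
  cases n <;> simp [PySem.Chars.replace.go]

lemma go_eq (k v : List Char) (hk : k ≠ []) :
    ∀ (fuel : Nat) (l acc : List Char), l.length ≤ fuel →
      PySem.Chars.replace.go k v fuel l acc = acc.reverse ++ pvRepl k v l := by
  intro fuel
  induction fuel with
  | zero =>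
    intro l acc hl
    have hnil : l = [] := by cases l with
      | nil => rfl
      | cons a l' => simp at hl
    subst hnil
    rw [go_nil, pvRepl_nil, List.append_nil]
  | succ n ih =>
    intro l acc hl
    cases l with
    | nil => rw [go_nil, pvRepl_nil, List.append_nil]
    | cons c t =>
      obtain ⟨m, hm⟩ : ∃ m, k.length = m + 1 := by
        cases k with
        | nil => exact absurd rfl hk
        | cons a k' => exact ⟨k'.length, by simp⟩
      rw [go_succ_cons]
      by_cases hmatch : k.isPrefixOf (c :: t) = true
      · rw [if_pos hmatch, pvRepl_cons, if_pos hmatch]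
        have hdrop : List.drop k.length (c :: t) = t.drop (k.length - 1) := by
          rw [hm]; simp
        rw [hdrop, ih (t.drop (k.length - 1)) (v.reverse ++ acc) (by simp at hl ⊢; omega)]
        simp [List.append_assoc]
      · rw [if_neg hmatch, pvRepl_cons, if_neg hmatch]
        rw [ih t (c :: acc) (by simp at hl ⊢; omega)]
        simp

lemma chars_replace_eq (k v s : List Char) (hk : k ≠ []) :
    PySem.Chars.replace s k v = pvRepl k v s := by
  unfold PySem.Chars.replace
  rw [if_neg (by simp [hk]), go_eq k v hk s.length s [] le_rfl]
  simp

lemma cr1 (s : List Char) :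
    PySem.Chars.replace s "impugned".toList "challenged".toList = pvRepl pk1 pv1 s := by
  rw [show "impugned".toList = pk1 from rfl, show "challenged".toList = pv1 from rfl]
  exact chars_replace_eq pk1 pv1 s (by decide)

lemma cr2 (s : List Char) :
    PySem.Chars.replace s "per contra".toList "on the other hand".toList = pvRepl pk2 pv2 s := by
  rw [show "per contra".toList = pk2 from rfl, show "on the other hand".toList = pv2 from rfl]
  exact chars_replace_eq pk2 pv2 s (by decide)

lemma cr3 (s : List Char) :
    PySem.Chars.replace s "inter alia".toList "among other things".toList = pvRepl pk3 pv3 s := by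
  rw [show "inter alia".toList = pk3 from rfl, show "among other things".toList = pv3 from rfl]
  exact chars_replace_eq pk3 pv3 s (by decide)

lemma cr4 (s : List Char) :
    PySem.Chars.replace s "vide".toList "see".toList = pvRepl pk4 pv4 s := by
  rw [show "vide".toList = pk4 from rfl, show "see".toList = pv4 from rfl]
  exact chars_replace_eq pk4 pv4 s (by decide)

lemma cr5 (s : List Char) :
    PySem.Chars.replace s "vis-a-vis".toList "compared to".toList = pvRepl pk5 pv5 s := by
  rw [show "vis-a-vis".toList = pk5 from rfl, show "compared to".toList = pv5 from rfl]
  exact chars_replace_eq pk5 pv5 s (by decide)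

lemma cr6 (s : List Char) :
    PySem.Chars.replace s "suo moto".toList "on its own".toList = pvRepl pk6 pv6 s := by
  rw [show "suo moto".toList = pk6 from rfl, show "on its own".toList = pv6 from rfl]
  exact chars_replace_eq pk6 pv6 s (by decide)

lemma cr7 (s : List Char) :
    PySem.Chars.replace s "prima facie".toList "at first glance".toList = pvRepl pk7 pv7 s := by
  rw [show "prima facie".toList = pk7 from rfl, show "at first glance".toList = pv7 from rfl]
  exact chars_replace_eq pk7 pv7 s (by decide)

lemma A_toList (s : String) :
    (post_process_llm_output s).toList = pvChain s.toList := by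
  unfold post_process_llm_output
  simp only [List.foldl_cons, List.foldl_nil]
  simp only [PySem.Str.toList_replace]
  rw [cr1, cr2, cr3, cr4, cr5, cr6, cr7]
  rfl

lemma B_toList (s : String) :
    (post_process_llm_output_alt s).toList = pvScan s.toList := by
  unfold post_process_llm_output_alt
  simp

-- ===== VERDICT =====
theorem post_process_llm_output_spec : Claim_equal_post_process_llm_output := by
  intro s _ hPre
  show post_process_llm_output s = post_process_llm_output_alt s
  have hclean : pvClean s.toList := by
    obtain ⟨hd1, hd2, hd3, hd4⟩ := hPre
    refine ⟨fun hx => ?_, fun hx => ?_, fun hx => ?_, fun hx => ?_⟩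
    · rw [(PySem.Str.isIn_iff_infix _ _).mpr hx] at hd1; exact absurd hd1 (by decide)
    · rw [(PySem.Str.isIn_iff_infix _ _).mpr hx] at hd2; exact absurd hd2 (by decide)
    · rw [(PySem.Str.isIn_iff_infix _ _).mpr hx] at hd3; exact absurd hd3 (by decide)
    · rw [(PySem.Str.isIn_iff_infix _ _).mpr hx] at hd4; exact absurd hd4 (by decide)
  have h := pvMain s.toList.length s.toList le_rfl hclean
  have hAB : (post_process_llm_output s).toList = (post_process_llm_output_alt s).toList := by
    rw [A_toList, B_toList, h]
  have := congrArg String.ofList hAB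
  simpa using this
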